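-- pv_equiv track=rewrite | github.com/moonctp24/For-Algorithm-Code | Python/Greedy/AandB.py | AmakeB
-- ===== SOURCE A (Python) =====
-- def reverseStr(str):
--     newStr = ''
--     for i in str:
--         if i == 'A':
--             newStr += 'B'
--         elif i == 'B':
--             newStr += 'A'
--     return newStr
--
-- def AmakeB(nowA, goalB):
--     if nowA == goalB:
--         return 1
--     elif len(nowA) > len(goalB):
--         return 0
--
--     result1 = AmakeB(nowA + 'A', goalB)
--     result2 = AmakeB(reverseStr(nowA) + 'B', goalB)
--
--     if result1 == 0 and result2 == 0:
--         return 0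
--     elif result1 == 1 or result2 == 1:
--         return 1
-- ===== SOURCE B (Python) =====
-- def AmakeB(nowA, goalB):
--     # Decide reachability directly from the structure of the two operations.
--     # A derivation either never flips -- then goalB is nowA extended by 'A's --
--     # or it flips for the first time on some nowA + 'A'*j, producing
--     # flip(nowA) + 'B'*(j+1); from then on every string is over {A,B} and the
--     # last character uniquely determines the inverse step, so one deterministic
--     # backward pass from goalB decides the rest.
--     k = len(goalB) - len(nowA)
--     if k >= 0 and goalB == nowA + 'A' * k:
--         return 1
--     if any(c not in 'AB' for c in goalB):
--         return 0
--     flipped = ''.join('B' if c == 'A' else 'A' for c in nowA if c in 'AB')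
--     starts = {flipped + 'B' * (j + 1) for j in range(k + 1)}
--     t = goalB
--     while t:
--         if t in starts:
--             return 1
--         if t[-1] == 'A':
--             t = t[:-1]
--         else:
--             t = ''.join('B' if c == 'A' else 'A' for c in t[:-1])
--     return 0
-- ===== Notes on version B (the rewrite author's own statement) =====
-- stated objective: faster
-- what changed: Replaces A's exponential forward recursion (try appending 'A' or flip-and-append 'B') by a direct decision procedure: check whether goalB is nowA extended by 'A's, otherwise enumerate the possible first-flip results flip(nowA)+'B'*(j+1) and run one deterministic backward pass from goalB in which the last character uniquely determines the inverse step.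
import Mathlib
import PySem

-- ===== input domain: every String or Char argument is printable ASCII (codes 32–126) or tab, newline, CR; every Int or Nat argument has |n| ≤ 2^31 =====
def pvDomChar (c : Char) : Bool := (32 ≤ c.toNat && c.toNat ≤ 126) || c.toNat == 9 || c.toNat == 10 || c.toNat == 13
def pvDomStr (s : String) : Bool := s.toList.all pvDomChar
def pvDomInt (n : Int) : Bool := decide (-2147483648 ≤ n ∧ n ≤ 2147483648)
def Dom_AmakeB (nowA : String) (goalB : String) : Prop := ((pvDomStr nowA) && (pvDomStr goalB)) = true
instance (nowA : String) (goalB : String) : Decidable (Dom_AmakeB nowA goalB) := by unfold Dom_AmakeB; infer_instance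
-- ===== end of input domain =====

-- B replaces A's exponential forward search by a check for the no-flip case plus one
-- deterministic backward pass from goalB (objective: faster, asymptotic).

-- ===== PORT A =====

def isAB (c : Char) : Bool := c == 'A' || c == 'B'

-- junk l = number of characters that are neither 'A' nor 'B' (used only in A's fuel bound below)
def junk (l : List Char) : Nat := (l.filter (fun c => !(isAB c))).length

def rsStep (acc : List Char) (i : Char) : List Char :=
  if i = 'A' then acc ++ ['B'] else if i = 'B' then acc ++ ['A'] else acc

-- Python reverseStr: flips 'A'↔'B' and drops every other character (it does NOT reverse order)
def reverseStrL (s : List Char) : List Char := s.foldl rsStep []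

-- literal transliteration of A's recursion; the fuel argument is only a totality guard
-- (meas1/meas2 below show the fuel AmakeB supplies is always sufficient, so fuel 0 is never reached)
def fAgo : Nat → List Char → List Char → Int
  | 0, _, _ => 0  -- unreachable with the fuel AmakeB supplies
  | fuel + 1, a, g =>
    if a = g then 1
    else if g.length < a.length then 0
    else
      let r1 := fAgo fuel (a ++ ['A']) g
      let r2 := fAgo fuel (reverseStrL a ++ ['B']) g
      if r1 = 0 ∧ r2 = 0 then 0
      else if r1 = 1 ∨ r2 = 1 then 1
      else 0  -- unreachable: the two results are always 0 or 1 (Python would fall through to None here)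

def AmakeB (nowA : String) (goalB : String) : Int :=
  fAgo (junk nowA.toList * (goalB.toList.length + 2) + (goalB.toList.length + 1 - nowA.toList.length) + 1)
    nowA.toList goalB.toList

-- ===== PORT B =====

def flipc (c : Char) : Char := if c = 'A' then 'B' else 'A'

-- backward while-loop of Source B; each iteration shortens t by one, so fuel |t|+1 is always sufficient
def loopB2 : Nat → List (List Char) → List Char → Int
  | 0, _, _ => 0  -- unreachable with the fuel AmakeB_alt supplies
  | fuel + 1, starts, t =>
    if t = [] then 0
    else if t ∈ starts then 1
    else if t.getLast? = some 'A' then loopB2 fuel starts t.dropLast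
    else loopB2 fuel starts (t.dropLast.map flipc)

def AmakeB_alt (nowA : String) (goalB : String) : Int :=
  let a := nowA.toList
  let g := goalB.toList
  if a.length ≤ g.length ∧ g = a ++ List.replicate (g.length - a.length) 'A' then 1
  else if g.any (fun c => !(isAB c)) then 0
  else
    let flipped := (a.filter isAB).map flipc
    -- Source B's range(k + 1) runs over the int k = len(goalB) - len(nowA): empty when k < 0
    let starts := if a.length ≤ g.length
      then (List.range (g.length - a.length + 1)).map
             (fun j => flipped ++ List.replicate (j + 1) 'B')
      else []
    loopB2 (g.length + 1) starts g

-- ===== PRECONDITION & SPEC =====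
def Spec_AmakeB (nowA : String) (goalB : String) (out : Int) : Prop := out = AmakeB_alt nowA goalB
instance (nowA : String) (goalB : String) (out : Int) : Decidable (Spec_AmakeB nowA goalB out) := by unfold Spec_AmakeB; infer_instance

-- ===== CLAIM (what is proved, stated in full; the proofs are below) =====
def Claim_equal_AmakeB : Prop := ∀ (nowA : String) (goalB : String), Dom_AmakeB nowA goalB → Spec_AmakeB nowA goalB (AmakeB nowA goalB)

-- ===== LEMMAS AND PROOFS =====

theorem rsl_aux (s : List Char) : ∀ acc : List Char,
    s.foldl rsStep acc = acc ++ (s.filter isAB).map flipc := by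
  induction s with
  | nil => intro acc; simp
  | cons c s ih =>
    intro acc
    by_cases hA : c = 'A'
    · subst hA; simp [List.foldl_cons, rsStep, isAB, flipc, ih]
    · by_cases hB : c = 'B'
      · subst hB; simp [List.foldl_cons, rsStep, isAB, flipc, ih]
      · simp [List.foldl_cons, rsStep, hA, hB, isAB, ih]

theorem reverseStrL_eq (s : List Char) : reverseStrL s = (s.filter isAB).map flipc := by
  simpa using rsl_aux s []

theorem junk_append (x y : List Char) : junk (x ++ y) = junk x + junk y := by
  simp [junk, List.filter_append]

theorem junk_append_A (a : List Char) : junk (a ++ ['A']) = junk a := by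
  simp [junk, List.filter_append, isAB]

theorem junk_map_flipc (l : List Char) : junk (l.map flipc) = 0 := by
  simp only [junk, List.length_eq_zero_iff, List.filter_eq_nil_iff]
  intro c hc
  rcases List.mem_map.1 hc with ⟨d, _, rfl⟩
  by_cases h : d = 'A' <;> simp [flipc, h, isAB]

theorem junk_rsl_B (a : List Char) : junk (reverseStrL a ++ ['B']) = 0 := by
  rw [junk_append, reverseStrL_eq, junk_map_flipc]; decide

theorem len_rsl_le (a : List Char) : (reverseStrL a).length ≤ a.length := by
  rw [reverseStrL_eq]; simpa using List.length_filter_le isAB a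

theorem len_rsl_of_pure (a : List Char) (h : junk a = 0) :
    (reverseStrL a).length = a.length := by
  rw [reverseStrL_eq]
  simp only [List.length_map]
  have : a.filter isAB = a := by
    apply List.filter_eq_self.2
    intro c hc
    by_contra hcc
    have : c ∈ a.filter (fun c => !(isAB c)) := List.mem_filter.2 ⟨hc, by simpa using hcc⟩
    have := List.length_eq_zero_iff.1 h ▸ this
    simp at this
  rw [this]

-- RB n t s : s can be transformed into t, every string a step is taken from having length ≤ n
inductive RB (n : Nat) (t : List Char) : List Char → Prop
  | refl : RB n t t
  | stepA (a : List Char) : a.length ≤ n → RB n t (a ++ ['A']) → RB n t a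
  | stepB (a : List Char) : a.length ≤ n → RB n t (reverseStrL a ++ ['B']) → RB n t a

theorem flipc_isAB (c : Char) : isAB (flipc c) = true := by
  by_cases h : c = 'A' <;> simp [flipc, h, isAB]

theorem flipc_flipc {c : Char} (h : isAB c = true) : flipc (flipc c) = c := by
  rcases (by simpa [isAB] using h : c = 'A' ∨ c = 'B') with rfl | rfl <;> decide

theorem rsl_of_pure (l : List Char) (h : ∀ c ∈ l, isAB c = true) :
    reverseStrL l = l.map flipc := by
  rw [reverseStrL_eq, List.filter_eq_self.2 h]

theorem rsl_pure (l : List Char) : ∀ c ∈ reverseStrL l, isAB c = true := by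
  rw [reverseStrL_eq]
  intro c hc
  rcases List.mem_map.1 hc with ⟨d, _, rfl⟩
  exact flipc_isAB d

theorem flip_flip_pure (l : List Char) (h : ∀ c ∈ l, isAB c = true) :
    (l.map flipc).map flipc = l := by
  rw [List.map_map]
  conv_rhs => rw [← List.map_id l]
  exact List.map_congr_left fun x hx => flipc_flipc (h x hx)

theorem rsl_append (x y : List Char) :
    reverseStrL (x ++ y) = reverseStrL x ++ reverseStrL y := by
  simp [reverseStrL_eq, List.filter_append]

theorem rsl_append_A (a : List Char) :
    reverseStrL (a ++ ['A']) = reverseStrL a ++ ['B'] := by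
  rw [rsl_append]
  rfl

-- one-step definitional unfoldings of the two fuelled loops
theorem fAgo_succ (N : Nat) (a g : List Char) : fAgo (N + 1) a g =
    (if a = g then 1
     else if g.length < a.length then 0
     else
       if fAgo N (a ++ ['A']) g = 0 ∧ fAgo N (reverseStrL a ++ ['B']) g = 0 then 0
       else if fAgo N (a ++ ['A']) g = 1 ∨ fAgo N (reverseStrL a ++ ['B']) g = 1 then 1
       else 0) := rfl

theorem loopB2_succ (N : Nat) (starts : List (List Char)) (t : List Char) :
    loopB2 (N + 1) starts t =
    (if t = [] then 0
     else if t ∈ starts then 1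
     else if t.getLast? = some 'A' then loopB2 N starts t.dropLast
     else loopB2 N starts (t.dropLast.map flipc)) := rfl

theorem RB_lastStep {n : Nat} {t : List Char} : ∀ {a : List Char}, RB n t a →
    t = a ∨ ∃ s, RB n s a ∧ s.length ≤ n ∧ (t = s ++ ['A'] ∨ t = reverseStrL s ++ ['B']) := by
  intro a h
  induction h with
  | refl => exact Or.inl rfl
  | stepA a hl _ ih =>
    rcases ih with h1 | ⟨s, hs, hsl, ho⟩
    · exact Or.inr ⟨a, RB.refl, hl, Or.inl h1⟩
    · exact Or.inr ⟨s, RB.stepA a hl hs, hsl, ho⟩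
  | stepB a hl _ ih =>
    rcases ih with h1 | ⟨s, hs, hsl, ho⟩
    · exact Or.inr ⟨a, RB.refl, hl, Or.inr h1⟩
    · exact Or.inr ⟨s, RB.stepB a hl hs, hsl, ho⟩

-- from a pure string only pure, strictly longer strings are reachable
theorem RB_len_pure {n : Nat} {t : List Char} : ∀ {a : List Char}, RB n t a →
    (∀ c ∈ a, isAB c = true) → (∀ c ∈ t, isAB c = true) ∧ (t = a ∨ a.length < t.length) := by
  intro a h
  induction h with
  | refl => intro hp; exact ⟨hp, Or.inl rfl⟩
  | stepA a _ _ ih =>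
    intro hp
    have hp' : ∀ c ∈ a ++ ['A'], isAB c = true := by
      intro c hc
      rcases List.mem_append.1 hc with h1 | h1
      · exact hp c h1
      · simp at h1; subst h1; decide
    obtain ⟨h1, h2⟩ := ih hp'
    refine ⟨h1, Or.inr ?_⟩
    rcases h2 with rfl | h2
    · simp
    · simp_all
      omega
  | stepB a _ _ ih =>
    intro hp
    have hfp : ∀ c ∈ reverseStrL a ++ ['B'], isAB c = true := by
      intro c hc
      rcases List.mem_append.1 hc with h1 | h1
      · exact rsl_pure a c h1
      · simp at h1; subst h1; decide
    obtain ⟨h1, h2⟩ := ih hfp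
    have hlen : (reverseStrL a ++ ['B']).length = a.length + 1 := by
      rw [rsl_of_pure a hp]; simp
    refine ⟨h1, Or.inr ?_⟩
    rcases h2 with rfl | h2
    · omega
    · omega

theorem RB_extendA {n : Nat} {s a : List Char} (h : RB n s a) (hl : s.length ≤ n) :
    RB n (s ++ ['A']) a := by
  induction h with
  | refl => exact RB.stepA _ hl RB.refl
  | stepA a ha _ ih => exact RB.stepA a ha ih
  | stepB a ha _ ih => exact RB.stepB a ha ih

theorem RB_extendB {n : Nat} {s a : List Char} (h : RB n s a) (hl : s.length ≤ n) :
    RB n (reverseStrL s ++ ['B']) a := by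
  induction h with
  | refl => exact RB.stepB _ hl RB.refl
  | stepA a ha _ ih => exact RB.stepA a ha ih
  | stepB a ha _ ih => exact RB.stepB a ha ih

theorem RB_trans {n : Nat} {g s : List Char} (h1 : RB n g s) :
    ∀ {a : List Char}, RB n s a → RB n g a := by
  intro a h2
  induction h2 with
  | refl => exact h1
  | stepA a ha _ ih => exact RB.stepA a ha ih
  | stepB a ha _ ih => exact RB.stepB a ha ih

-- only-'A' extensions are reachable
theorem RB_selfA {glen : Nat} (a : List Char) :
    ∀ k : Nat, a.length + k ≤ glen → RB glen (a ++ List.replicate k 'A') a := by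
  intro k
  induction k with
  | zero => intro _; simp; exact RB.refl
  | succ k ih =>
    intro h
    have h1 := RB_extendA (ih (by omega)) (by simp; omega)
    have he : (a ++ List.replicate k 'A') ++ ['A'] = a ++ List.replicate (k + 1) 'A' := by
      rw [List.append_assoc, ← List.replicate_succ']
    rwa [he] at h1

-- the first-flip results reverseStrL a ++ 'B'^(k+1) are reachable
theorem RB_family {n : Nat} : ∀ (k : Nat) (a : List Char), a.length + k ≤ n →
    RB n (reverseStrL a ++ List.replicate (k + 1) 'B') a := by
  intro k
  induction k with
  | zero =>
    intro a h
    exact RB.stepB a (by omega) RB.refl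
  | succ k ih =>
    intro a h
    apply RB.stepA a (by omega)
    have h2 : (a ++ ['A']).length + k ≤ n := by simp; omega
    have h3 := ih (a ++ ['A']) h2
    have he : reverseStrL (a ++ ['A']) ++ List.replicate (k + 1) 'B'
        = reverseStrL a ++ List.replicate (k + 1 + 1) 'B' := by
      rw [rsl_append_A]
      simp [List.replicate_succ]
    rwa [he] at h3

-- a reachable string is either an only-'A' extension or pure and reachable from a first-flip result
theorem RB_char_fwd {glen : Nat} {g : List Char} : ∀ {a : List Char}, RB glen g a →
    (a.length ≤ g.length ∧ g = a ++ List.replicate (g.length - a.length) 'A')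
    ∨ ((∀ c ∈ g, isAB c = true)
        ∧ ∃ j, a.length + j ≤ glen ∧ RB glen g (reverseStrL a ++ List.replicate (j + 1) 'B')) := by
  intro a h
  induction h with
  | refl => exact Or.inl ⟨le_rfl, by simp⟩
  | stepA a hl h ih =>
    rcases ih with ⟨hle, heq⟩ | ⟨hp, j, hj, hr⟩
    · left
      have hle' : a.length + 1 ≤ g.length := by simpa using hle
      have heq' : g = a ++ List.replicate ((g.length - (a ++ ['A']).length) + 1) 'A' := by
        rw [List.replicate_succ, heq]
        simp
        omega
      refine ⟨by omega, ?_⟩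
      have hcount : g.length - a.length = (g.length - (a ++ ['A']).length) + 1 := by
        simp
        omega
      rw [hcount]
      exact heq'
    · right
      refine ⟨hp, j + 1, by simp at hj; omega, ?_⟩
      have he : reverseStrL (a ++ ['A']) ++ List.replicate (j + 1) 'B'
          = reverseStrL a ++ List.replicate (j + 1 + 1) 'B' := by
        rw [rsl_append_A]
        simp [List.replicate_succ]
      rwa [he] at hr
  | stepB a hl h _ =>
    right
    have hseed : ∀ c ∈ reverseStrL a ++ ['B'], isAB c = true := by
      intro c hc
      rcases List.mem_append.1 hc with h1 | h1
      · exact rsl_pure a c h1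
      · simp at h1; subst h1; decide
    refine ⟨(RB_len_pure h hseed).1, 0, by omega, ?_⟩
    simpa using h

-- decrease of A's fuel measure along the two recursive calls
theorem meas1 (a g : List Char) (h : a.length ≤ g.length) :
    junk (a ++ ['A']) * (g.length + 2) + (g.length + 1 - (a ++ ['A']).length)
      < junk a * (g.length + 2) + (g.length + 1 - a.length) := by
  rw [junk_append_A]
  simp only [List.length_append, List.length_cons, List.length_nil]
  omega

theorem meas2 (a g : List Char) (h : a.length ≤ g.length) :
    junk (reverseStrL a ++ ['B']) * (g.length + 2)
        + (g.length + 1 - (reverseStrL a ++ ['B']).length)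
      < junk a * (g.length + 2) + (g.length + 1 - a.length) := by
  rw [junk_rsl_B]
  simp only [Nat.zero_mul, Nat.zero_add, List.length_append, List.length_cons, List.length_nil]
  by_cases hj : junk a = 0
  · rw [hj, len_rsl_of_pure a hj]
    omega
  · have hm : g.length + 2 ≤ junk a * (g.length + 2) := Nat.le_mul_of_pos_left _ (by omega)
    have := len_rsl_le a
    omega

theorem fAgo_vals : ∀ (N : Nat) (a g : List Char), fAgo N a g = 0 ∨ fAgo N a g = 1 := by
  intro N
  induction N with
  | zero => intro a g; exact Or.inl rfl
  | succ N _ =>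
    intro a g
    rw [fAgo_succ]
    split_ifs <;> simp

theorem loopB2_vals : ∀ (N : Nat) (starts : List (List Char)) (t : List Char),
    loopB2 N starts t = 0 ∨ loopB2 N starts t = 1 := by
  intro N
  induction N with
  | zero => intro starts t; exact Or.inl rfl
  | succ N ih =>
    intro starts t
    rw [loopB2_succ]
    split_ifs
    · simp
    · simp
    · exact ih starts t.dropLast
    · exact ih starts (t.dropLast.map flipc)

theorem fAgo_of_RB {g : List Char} : ∀ {a : List Char}, RB g.length g a →
    ∀ N, junk a * (g.length + 2) + (g.length + 1 - a.length) < N → fAgo N a g = 1 := by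
  intro a h
  induction h with
  | refl =>
    intro N hN
    cases N with
    | zero => omega
    | succ N => rw [fAgo_succ]; simp
  | stepA a hl _ ih =>
    intro N hN
    cases N with
    | zero => omega
    | succ N =>
      have h1 : fAgo N (a ++ ['A']) g = 1 := ih N (by have := meas1 a g hl; omega)
      rw [fAgo_succ]
      by_cases he : a = g
      · simp [he]
      · have hle : ¬ g.length < a.length := Nat.not_lt.2 hl
        simp [he, hle, h1]
  | stepB a hl _ ih =>
    intro N hN
    cases N with
    | zero => omega
    | succ N =>
      have h1 : fAgo N (reverseStrL a ++ ['B']) g = 1 := ih N (by have := meas2 a g hl; omega)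
      rw [fAgo_succ]
      by_cases he : a = g
      · simp [he]
      · have hle : ¬ g.length < a.length := Nat.not_lt.2 hl
        simp [he, hle, h1]

theorem fAgo_to_RB : ∀ (N : Nat) (a g : List Char),
    junk a * (g.length + 2) + (g.length + 1 - a.length) < N →
    fAgo N a g = 1 → RB g.length g a := by
  intro N
  induction N with
  | zero => intro a g h; omega
  | succ N ih =>
    intro a g hm hf
    rw [fAgo_succ] at hf
    by_cases he : a = g
    · subst he; exact RB.refl
    · rw [if_neg he] at hf
      by_cases hl : g.length < a.length
      · rw [if_pos hl] at hf
        exact absurd hf (by decide)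
      · rw [if_neg hl] at hf
        have hle : a.length ≤ g.length := Nat.not_lt.1 hl
        have hm1 : junk (a ++ ['A']) * (g.length + 2) + (g.length + 1 - (a ++ ['A']).length) < N := by
          have := meas1 a g hle; omega
        have hm2 : junk (reverseStrL a ++ ['B']) * (g.length + 2)
            + (g.length + 1 - (reverseStrL a ++ ['B']).length) < N := by
          have := meas2 a g hle; omega
        rcases fAgo_vals N (a ++ ['A']) g with h1 | h1 <;>
          rcases fAgo_vals N (reverseStrL a ++ ['B']) g with h2 | h2
        · simp [h1, h2] at hf
        · exact RB.stepB a hle (ih _ g hm2 h2)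
        · exact RB.stepA a hle (ih _ g hm1 h1)
        · exact RB.stepA a hle (ih _ g hm1 h1)

-- B's backward loop decides reachability from one of the start strings (pure, nonempty)
theorem loopB2_iff (glen : Nat) (starts : List (List Char))
    (hst : ∀ s ∈ starts, s ≠ [] ∧ ∀ c ∈ s, isAB c = true) :
    ∀ (n : Nat) (t : List Char), t.length ≤ n → (∀ c ∈ t, isAB c = true) → t.length ≤ glen →
    (loopB2 (n + 1) starts t = 1 ↔ ∃ s ∈ starts, RB glen t s) := by
  intro n
  induction n with
  | zero =>
    intro t htn hpt _
    have ht : t = [] := List.length_eq_zero_iff.1 (Nat.le_zero.1 htn)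
    subst ht
    rw [loopB2_succ, if_pos rfl]
    constructor
    · intro h; exact absurd h (by decide)
    · rintro ⟨s, hsm, hr⟩
      obtain ⟨hne, hps⟩ := hst s hsm
      rcases (RB_len_pure hr hps).2 with rfl | h2
      · exact absurd rfl hne
      · simp at h2
  | succ n ih =>
    intro t htn hpt htg
    rcases List.eq_nil_or_concat t with rfl | ⟨t', c, htc⟩
    · rw [loopB2_succ, if_pos rfl]
      constructor
      · intro h; exact absurd h (by decide)
      · rintro ⟨s, hsm, hr⟩
        obtain ⟨hne, hps⟩ := hst s hsm
        rcases (RB_len_pure hr hps).2 with rfl | h2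
        · exact absurd rfl hne
        · simp at h2
    · rw [List.concat_eq_append] at htc
      subst htc
      rw [loopB2_succ, if_neg (by simp)]
      by_cases hmem : t' ++ [c] ∈ starts
      · rw [if_pos hmem]
        exact ⟨fun _ => ⟨t' ++ [c], hmem, RB.refl⟩, fun _ => rfl⟩
      · rw [if_neg hmem]
        have hlen : (t' ++ [c]).length = t'.length + 1 := by simp
        have hgl : (t' ++ [c]).getLast? = some c := by simp
        have hdl : (t' ++ [c]).dropLast = t' := by simp
        have hpt' : ∀ x ∈ t', isAB x = true := fun x hx => hpt x (List.mem_append.2 (Or.inl hx))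
        have hne : ∀ s ∈ starts, t' ++ [c] ≠ s := by
          intro s hsm h
          exact hmem (h ▸ hsm)
        have hcAB : c = 'A' ∨ c = 'B' := by
          have := hpt c (List.mem_append.2 (Or.inr (by simp)))
          simpa [isAB] using this
        rcases hcAB with rfl | rfl
        · rw [hgl, if_pos rfl, hdl]
          rw [ih t' (by omega) hpt' (by omega)]
          constructor
          · rintro ⟨s, hsm, hr⟩
            exact ⟨s, hsm, RB_extendA hr (by omega)⟩
          · rintro ⟨s, hsm, hr⟩
            rcases RB_lastStep hr with h1 | ⟨u, hu, _, h2 | h2⟩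
            · exact absurd h1 (hne s hsm)
            · have := (List.append_inj' h2 rfl).1
              exact ⟨s, hsm, this ▸ hu⟩
            · have h3 := (List.append_inj' h2 rfl).2
              simp at h3
        · rw [hgl, if_neg (by simp), hdl]
          have hpf : ∀ x ∈ t'.map flipc, isAB x = true := by
            intro x hx
            rcases List.mem_map.1 hx with ⟨d, _, rfl⟩
            exact flipc_isAB d
          rw [ih (t'.map flipc) (by simp; omega) hpf (by simp; omega)]
          constructor
          · rintro ⟨s, hsm, hr⟩
            have hkey : reverseStrL (t'.map flipc) = t' := by
              rw [rsl_of_pure _ hpf]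
              exact flip_flip_pure t' hpt'
            have hext := RB_extendB hr (by simp; omega)
            rw [hkey] at hext
            exact ⟨s, hsm, hext⟩
          · rintro ⟨s, hsm, hr⟩
            rcases RB_lastStep hr with h1 | ⟨u, hu, _, h2 | h2⟩
            · exact absurd h1 (hne s hsm)
            · have h3 := (List.append_inj' h2 rfl).2
              simp at h3
            · have hus : t' = reverseStrL u := (List.append_inj' h2 rfl).1
              have hps : ∀ x ∈ u, isAB x = true := (RB_len_pure hu (hst s hsm).2).1
              have hss : t'.map flipc = u := by
                rw [hus, rsl_of_pure u hps]
                exact flip_flip_pure u hps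
              exact ⟨s, hsm, hss ▸ hu⟩

-- ===== VERDICT (by name: the statement is the Claim_ definition above) =====
theorem AmakeB_spec : Claim_equal_AmakeB := by
  unfold Claim_equal_AmakeB
  intro nowA goalB _
  unfold Spec_AmakeB
  have hA : AmakeB nowA goalB
      = fAgo (junk nowA.toList * (goalB.toList.length + 2)
          + (goalB.toList.length + 1 - nowA.toList.length) + 1) nowA.toList goalB.toList := rfl
  have hB : AmakeB_alt nowA goalB =
      (if nowA.toList.length ≤ goalB.toList.length
          ∧ goalB.toList = nowA.toList
              ++ List.replicate (goalB.toList.length - nowA.toList.length) 'A' then 1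
       else if goalB.toList.any (fun c => !(isAB c)) then 0
       else loopB2 (goalB.toList.length + 1)
         (if nowA.toList.length ≤ goalB.toList.length
          then (List.range (goalB.toList.length - nowA.toList.length + 1)).map
                 (fun j => ((nowA.toList.filter isAB).map flipc) ++ List.replicate (j + 1) 'B')
          else [])
         goalB.toList) := rfl
  rw [hA, hB]
  generalize nowA.toList = a
  generalize goalB.toList = g
  have h1 : fAgo (junk a * (g.length + 2) + (g.length + 1 - a.length) + 1) a g = 1
      ↔ RB g.length g a :=
    ⟨fAgo_to_RB _ a g (by omega), fun hR => fAgo_of_RB hR _ (by omega)⟩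
  have hv1 := fAgo_vals (junk a * (g.length + 2) + (g.length + 1 - a.length) + 1) a g
  by_cases hb1 : a.length ≤ g.length ∧ g = a ++ List.replicate (g.length - a.length) 'A'
  · rw [if_pos hb1]
    apply h1.2
    have hR := RB_selfA (glen := g.length) a (g.length - a.length) (by omega)
    rwa [← hb1.2] at hR
  · rw [if_neg hb1]
    by_cases hj : g.any (fun c => !(isAB c)) = true
    · rw [if_pos hj]
      rcases hv1 with h | h
      · exact h
      · exfalso
        rcases RB_char_fwd (h1.1 h) with h2 | ⟨hp, _⟩
        · exact hb1 h2
        · rcases List.any_eq_true.1 hj with ⟨c, hc, hcp⟩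
          rw [hp c hc] at hcp
          simp at hcp
    · rw [if_neg hj]
      have hpg : ∀ c ∈ g, isAB c = true := by
        intro c hc
        by_contra hcc
        exact hj (List.any_eq_true.2 ⟨c, hc, by simpa using hcc⟩)
      have hflip : (a.filter isAB).map flipc = reverseStrL a := (reverseStrL_eq a).symm
      by_cases hle : a.length ≤ g.length
      · rw [if_pos hle]
        have hst : ∀ s ∈ (List.range (g.length - a.length + 1)).map
            (fun j => ((a.filter isAB).map flipc) ++ List.replicate (j + 1) 'B'),
            s ≠ [] ∧ ∀ c ∈ s, isAB c = true := by
          intro s hs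
          rcases List.mem_map.1 hs with ⟨j, _, rfl⟩
          refine ⟨by simp, ?_⟩
          intro c hc
          rcases List.mem_append.1 hc with h | h
          · rcases List.mem_map.1 h with ⟨d, _, rfl⟩
            exact flipc_isAB d
          · rw [List.eq_of_mem_replicate h]
            decide
        have h2 := loopB2_iff g.length _ hst g.length g le_rfl hpg le_rfl
        have hv2 := loopB2_vals (g.length + 1) ((List.range (g.length - a.length + 1)).map
            (fun j => ((a.filter isAB).map flipc) ++ List.replicate (j + 1) 'B')) g
        by_cases hR : RB g.length g a
        · rw [h1.2 hR]
          symm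
          apply h2.2
          rcases RB_char_fwd hR with hc1 | ⟨_, j, hjle, hr⟩
          · exact absurd hc1 hb1
          · refine ⟨reverseStrL a ++ List.replicate (j + 1) 'B', ?_, hr⟩
            exact List.mem_map.2 ⟨j, List.mem_range.2 (by omega), by rw [hflip]⟩
        · have hf0 := hv1.resolve_right (fun h => hR (h1.1 h))
          have hl0 : loopB2 (g.length + 1) ((List.range (g.length - a.length + 1)).map
              (fun j => ((a.filter isAB).map flipc) ++ List.replicate (j + 1) 'B')) g = 0 := by
            rcases hv2 with h | h
            · exact h
            · exfalso
              rcases h2.1 h with ⟨s, hsm, hr⟩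
              rcases List.mem_map.1 hsm with ⟨j, hjm, rfl⟩
              have hjk : a.length + j ≤ g.length := by
                have := List.mem_range.1 hjm
                omega
              have hseed := RB_family j a hjk
              rw [← hflip] at hseed
              exact hR (RB_trans hr hseed)
          rw [hf0, hl0]
      · rw [if_neg hle]
        have h2 := loopB2_iff g.length [] (by simp) g.length g le_rfl hpg le_rfl
        have hv2 := loopB2_vals (g.length + 1) [] g
        have hR : ¬ RB g.length g a := by
          intro hR
          rcases RB_char_fwd hR with ⟨hc1, _⟩ | ⟨_, j, hjle, _⟩
          · exact hle hc1
          · omega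
        have hf0 := hv1.resolve_right (fun h => hR (h1.1 h))
        have hl0 := hv2.resolve_right (fun h => by
          rcases h2.1 h with ⟨s, hsm, _⟩
          simp at hsm)
        rw [hf0, hl0]
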